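-- pv_equiv track=rewrite | github.com/pypi-data/pypi-mirror-404 | packages/onetool-mcp/onetool_mcp-1.0.0b1-py3-none-any.whl/ot/executor/param_resolver.py | resolve_kwargs
-- ===== SOURCE A (Python) =====
-- from collections.abc import Sequence
--
-- def resolve_kwargs(
--     kwargs: dict[str, object], param_names: Sequence[str]
-- ) -> dict[str, object]:
--     """Resolve abbreviated parameter names to full parameter names.
--
--     Matching rules:
--     1. Exact match wins - if param name matches exactly, use it
--     2. Prefix match - find all params that start with the abbreviated name
--     3. First match wins - if multiple params match, use first in param_names order
--
--     Args:
--         kwargs: Dictionary of parameter names to values.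
--         param_names: Sequence of valid parameter names in signature order.
--
--     Returns:
--         New dictionary with resolved parameter names.
--
--     Examples:
--         >>> resolve_kwargs({"q": "test"}, ["query", "count"])
--         {"query": "test"}
--
--         >>> resolve_kwargs({"query": "test"}, ["query", "count"])
--         {"query": "test"}  # exact match
--
--         >>> resolve_kwargs({"q": "x"}, ["query_info", "query", "quality"])
--         {"query_info": "x"}  # first prefix match
--
--         >>> resolve_kwargs({"xyz": "test"}, ["query"])
--         {"xyz": "test"}  # no match, passthrough
--     """
--     if not kwargs or not param_names:
--         return kwargs
--
--     param_set = set(param_names)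
--     resolved: dict[str, object] = {}
--
--     for key, value in kwargs.items():
--         # Exact match - use as-is
--         if key in param_set:
--             resolved[key] = value
--             continue
--
--         # Find prefix matches (preserve signature order)
--         matches = [p for p in param_names if p.startswith(key)]
--
--         if len(matches) == 1:
--             # Single match - use it
--             resolved[matches[0]] = value
--         elif len(matches) > 1:
--             # Multiple matches - use first in signature order
--             resolved[matches[0]] = value
--         else:
--             # No match - passthrough (let function raise its own error)
--             resolved[key] = value
--
--     return resolved
-- ===== SOURCE B (Python) =====
-- def resolve_kwargs(kwargs, param_names):
--     """Resolve abbreviated parameter names via a prefix index built once.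
--
--     Every prefix of every param name is mapped (setdefault, so first in
--     signature order wins) to that param; each key then resolves in O(1).
--     """
--     if not param_names:
--         return kwargs
--
--     prefix_map = {}
--     for p in param_names:
--         pre = ""
--         prefix_map.setdefault(pre, p)
--         for ch in p:
--             pre += ch
--             prefix_map.setdefault(pre, p)
--
--     exact = set(param_names)
--     return {
--         (key if key in exact else prefix_map.get(key, key)): value
--         for key, value in kwargs.items()
--     }
-- ===== Notes on version B (the rewrite author's own statement) =====
-- stated objective: faster
-- what changed: Instead of scanning param_names for prefix matches once per kwarg key, B builds one dictionary mapping every prefix of every param name to the first param (in signature order) carrying that prefix, so each key resolves by a single hash lookup.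
import Mathlib
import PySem

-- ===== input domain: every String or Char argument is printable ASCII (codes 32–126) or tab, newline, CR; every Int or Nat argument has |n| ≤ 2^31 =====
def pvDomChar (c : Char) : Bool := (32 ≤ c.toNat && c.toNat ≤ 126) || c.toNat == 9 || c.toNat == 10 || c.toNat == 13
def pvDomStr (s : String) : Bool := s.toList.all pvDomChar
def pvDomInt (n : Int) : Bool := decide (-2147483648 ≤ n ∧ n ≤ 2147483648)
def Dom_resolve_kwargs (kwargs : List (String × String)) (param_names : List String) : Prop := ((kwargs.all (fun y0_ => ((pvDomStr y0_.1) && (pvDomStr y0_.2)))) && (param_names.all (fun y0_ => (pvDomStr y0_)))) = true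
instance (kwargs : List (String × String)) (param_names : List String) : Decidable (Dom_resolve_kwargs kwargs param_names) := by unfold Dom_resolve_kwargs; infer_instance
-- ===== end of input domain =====

-- B replaces the per-key scan of param_names by a prefix→param dictionary
-- built once with setdefault (first param in signature order wins), so each
-- key resolves by a single lookup; objective: faster (asymptotic).


-- ===== PORT A =====
def resolve_kwargs (kwargs : List (String × String)) (param_names : List String) : List (String × String) :=
  if kwargs.isEmpty || param_names.isEmpty then kwargs
  else
    let param_set : PySem.Set String := PySem.Set.ofList param_names
    (kwargs.foldl (fun (resolved : PySem.Dict String String) kv =>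
      if PySem.Set.contains param_set kv.1 then
        resolved.insert kv.1 kv.2
      else
        let matches_ := param_names.filter (fun p => PySem.Str.startswith p kv.1)
        if matches_.length == 1 then
          resolved.insert matches_.head! kv.2
        else if matches_.length > 1 then
          resolved.insert matches_.head! kv.2
        else
          resolved.insert kv.1 kv.2) PySem.Dict.empty).items

-- ===== PORT B =====
-- the inner 'pre = ""; setdefault; for ch in p: pre += ch; setdefault' loop of Source B
def pvAddPrefixes (d : PySem.Dict String String) (p : String) : PySem.Dict String String :=
  (p.toList.foldl (fun (st : String × PySem.Dict String String) c =>
      (st.1.push c, st.2.setdefault (st.1.push c) p))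
    ("", d.setdefault "" p)).2

def resolve_kwargs_alt (kwargs : List (String × String)) (param_names : List String) : List (String × String) :=
  if param_names.isEmpty then kwargs
  else
    let prefix_map := param_names.foldl pvAddPrefixes PySem.Dict.empty
    let exact : PySem.Set String := PySem.Set.ofList param_names
    (kwargs.foldl (fun (d : PySem.Dict String String) kv =>
        d.insert (if PySem.Set.contains exact kv.1 then kv.1 else prefix_map.getD kv.1 kv.1) kv.2)
      PySem.Dict.empty).items

-- ===== PRECONDITION & SPEC =====
def Spec_resolve_kwargs (kwargs : List (String × String)) (param_names : List String) (out : List (String × String)) : Prop := out = resolve_kwargs_alt kwargs param_names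
instance (kwargs : List (String × String)) (param_names : List String) (out : List (String × String)) : Decidable (Spec_resolve_kwargs kwargs param_names out) := by unfold Spec_resolve_kwargs; infer_instance

-- ===== CLAIM (what is proved, stated in full; the proofs are below) =====
def Claim_equal_resolve_kwargs : Prop := ∀ (kwargs : List (String × String)) (param_names : List String), Dom_resolve_kwargs kwargs param_names → Spec_resolve_kwargs kwargs param_names (resolve_kwargs kwargs param_names)

-- ===== LEMMAS AND PROOFS =====

-- the successive nonempty extensions of `pre` by the characters of `cs`
def pvPrefAccum (pre : String) : List Char → List String
  | [] => []
  | c :: cs => (pre.push c) :: pvPrefAccum (pre.push c) cs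

theorem pv_get?_setdefault (d : PySem.Dict String String) (k v key : String) :
    (d.setdefault k v).get? key = (d.get? key).or (if key = k then some v else none) := by
  by_cases h : key = k
  · subst h
    rw [PySem.Dict.get?_setdefault_self]
    cases hg : d.get? key <;> simp [Option.or]
  · rw [PySem.Dict.get?_setdefault_of_ne d v h]
    cases hg : d.get? key <;> simp [Option.or, h]

theorem pv_inner_fold (p key : String) :
    ∀ (cs : List Char) (pre : String) (d : PySem.Dict String String),
    ((cs.foldl (fun (st : String × PySem.Dict String String) c =>
        (st.1.push c, st.2.setdefault (st.1.push c) p)) (pre, d)).2).get? key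
      = (d.get? key).or (if key ∈ pvPrefAccum pre cs then some p else none) := by
  intro cs
  induction cs with
  | nil => intro pre d; simp [pvPrefAccum]
  | cons c cs ih =>
    intro pre d
    simp only [List.foldl_cons]
    rw [ih (pre.push c) (d.setdefault (pre.push c) p), pv_get?_setdefault]
    rw [Option.or_assoc]
    congr 1
    by_cases h1 : key = pre.push c <;> by_cases h2 : key ∈ pvPrefAccum (pre.push c) cs <;>
      simp [pvPrefAccum, h1, h2, Option.or]

theorem pv_mem_prefAccum (key : String) :
    ∀ (cs : List Char) (pre : String),
    (key ∈ pre :: pvPrefAccum pre cs) ↔ ∃ t, t <+: cs ∧ key.toList = pre.toList ++ t := by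
  intro cs
  induction cs with
  | nil =>
    intro pre
    constructor
    · intro h
      simp only [pvPrefAccum, List.mem_singleton] at h
      exact ⟨[], List.prefix_refl _, by simp [h]⟩
    · rintro ⟨t, ht, hk⟩
      have : t = [] := List.prefix_nil.mp ht
      subst this
      simp only [List.append_nil] at hk
      simp [String.toList_inj.mp hk, pvPrefAccum]
  | cons c cs ih =>
    intro pre
    constructor
    · intro h
      rcases List.mem_cons.mp h with h | h
      · exact ⟨[], by simp, by simp [h]⟩
      · rcases (ih (pre.push c)).mp (by simpa [pvPrefAccum] using h) with ⟨t, ht, hk⟩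
        exact ⟨c :: t, List.cons_prefix_cons.mpr ⟨rfl, ht⟩, by simpa [String.toList_push] using hk⟩
    · rintro ⟨t, ht, hk⟩
      cases t with
      | nil =>
        simp only [List.append_nil] at hk
        simp [String.toList_inj.mp hk]
      | cons c' t' =>
        obtain ⟨rfl, ht'⟩ := List.cons_prefix_cons.mp ht
        refine List.mem_cons.mpr (Or.inr ?_)
        have : key ∈ pre.push c' :: pvPrefAccum (pre.push c') cs :=
          (ih (pre.push c')).mpr ⟨t', ht', by simpa [String.toList_push] using hk⟩
        simpa [pvPrefAccum] using this

theorem pv_mem_all_prefixes (p key : String) :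
    (key ∈ "" :: pvPrefAccum "" p.toList) ↔ PySem.Str.startswith p key = true := by
  rw [pv_mem_prefAccum key p.toList ""]
  have : PySem.Str.startswith p key = PySem.Chars.startswith p.toList key.toList := by
    simp [pysem]
  rw [this, PySem.Chars.startswith_iff]
  constructor
  · rintro ⟨t, ht, hk⟩
    rw [hk]; simpa using ht
  · intro h
    exact ⟨key.toList, by simpa using h, by simp⟩

theorem pv_get?_addPrefixes (d : PySem.Dict String String) (p key : String) :
    (pvAddPrefixes d p).get? key
      = (d.get? key).or (if PySem.Str.startswith p key then some p else none) := by
  unfold pvAddPrefixes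
  rw [pv_inner_fold p key p.toList "" (d.setdefault "" p), pv_get?_setdefault, Option.or_assoc]
  congr 1
  by_cases h1 : key = "" <;> by_cases h2 : key ∈ pvPrefAccum "" p.toList
  all_goals
    have := pv_mem_all_prefixes p key
    simp only [List.mem_cons] at this
    simp [h1, h2, Option.or] at this ⊢
    simp [this]

theorem pv_get?_prefixMap (key : String) :
    ∀ (ps : List String) (d : PySem.Dict String String),
    (ps.foldl pvAddPrefixes d).get? key
      = (d.get? key).or ((ps.filter (fun p => PySem.Str.startswith p key)).head?) := by
  intro ps
  induction ps with
  | nil => intro d; simp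
  | cons p ps ih =>
    intro d
    simp only [List.foldl_cons]
    rw [ih (pvAddPrefixes d p), pv_get?_addPrefixes, Option.or_assoc]
    congr 1
    by_cases h : PySem.Str.startswith p key = true
    · rw [if_pos h]
      simp only [List.filter_cons, h, if_true]
      simp [Option.or]
    · rw [if_neg h]
      simp only [List.filter_cons, h, Bool.false_eq_true, if_false]
      simp [Option.or]

-- ===== VERDICT (by name: the statement is the Claim_ definition above) =====
theorem resolve_kwargs_spec : Claim_equal_resolve_kwargs := by
  intro kwargs param_names _
  unfold Spec_resolve_kwargs resolve_kwargs resolve_kwargs_alt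
  by_cases hps : param_names.isEmpty
  · simp [hps]
  · by_cases hkw : kwargs.isEmpty
    · have hk0 : kwargs = [] := by simpa [List.isEmpty_iff] using hkw
      subst hk0
      rw [if_pos (by simp), if_neg hps]
      rfl
    · rw [if_neg (by simp [hkw, hps]), if_neg hps]
      refine congrArg PySem.Dict.items (List.foldl_ext _ _ PySem.Dict.empty ?_)
      intro d kv _
      show (if (PySem.Set.ofList param_names).contains kv.1 = true then d.insert kv.1 kv.2
            else
              let matches_ := List.filter (fun p => PySem.Str.startswith p kv.1) param_names
              if (matches_.length == 1) = true then d.insert matches_.head! kv.2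
              else if matches_.length > 1 then d.insert matches_.head! kv.2
              else d.insert kv.1 kv.2)
          = d.insert (if (PySem.Set.ofList param_names).contains kv.1 = true then kv.1
              else (List.foldl pvAddPrefixes PySem.Dict.empty param_names).getD kv.1 kv.1) kv.2
      by_cases hex : (PySem.Set.ofList param_names).contains kv.1 = true
      · simp only [hex, if_true]
      · simp only [hex]
        have hpm : (List.foldl pvAddPrefixes PySem.Dict.empty param_names).getD kv.1 kv.1
            = ((param_names.filter (fun p => PySem.Str.startswith p kv.1)).head?).getD kv.1 := by
          rw [PySem.Dict.getD_eq_get?_getD, pv_get?_prefixMap kv.1 param_names PySem.Dict.empty]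
          simp [Option.or]
        rw [hpm]
        cases hm : param_names.filter (fun p => PySem.Str.startswith p kv.1) with
        | nil => simp
        | cons m rest =>
          cases rest with
          | nil => simp
          | cons m2 rest2 => simp [List.head!]
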